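-- pv_equiv track=rewrite | github.com/flotttt/Job-application-automator | src/generator/generate_letters.py | select_relevant_projects
-- ===== SOURCE A (Python) =====
-- def select_relevant_projects(profile, job_description, max_projects=2):
--     projects = profile.get('projets', [])
--     if not projects:
--         return []
--
--     job_desc_lower = job_description.lower()
--     scored_projects = []
--
--     for project in projects:
--         score = 0
--         project_text = f"{project.get('nom', '')} {project.get('description', '')}".lower()
--
--         keywords = ['react', 'next', 'node', 'java', 'spring', 'python', 'api', 'data', 'ia', 'test', 'docker',
--                     'postgres']
--         for keyword in keywords:
--             if keyword in job_desc_lower and keyword in project_text: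
--                 score += 1
--
--         scored_projects.append((score, project))
--
--     scored_projects.sort(reverse=True, key=lambda x: x[0])
--     return [proj for score, proj in scored_projects[:max_projects]]
-- ===== SOURCE B (Python) =====
-- KEYWORDS = ['react', 'next', 'node', 'java', 'spring', 'python', 'api', 'data', 'ia', 'test', 'docker',
--             'postgres']
--
--
-- def select_relevant_projects(profile, job_description, max_projects=2):
--     projects = profile.get('projets', [])
--     job_desc_lower = job_description.lower()
--     relevant = [k for k in KEYWORDS if k in job_desc_lower]
--
--     # bucket projects by score (0..len(relevant)); within a bucket original order is kept
--     buckets = [[] for _ in range(len(relevant) + 1)]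
--     for project in projects:
--         text = f"{project.get('nom', '')} {project.get('description', '')}".lower()
--         score = sum(1 for k in relevant if k in text)
--         buckets[score].append(project)
--
--     ordered = [p for bucket in reversed(buckets) for p in bucket]
--     return ordered[:max_projects]
-- ===== Notes on version B (the rewrite author's own statement) =====
-- stated objective: alternative
-- what changed: B precomputes the keywords present in the job description once, then replaces A's append-all-pairs plus full stable reverse sort with a counting-sort: projects are dropped into per-score buckets (score range is bounded by the number of relevant keywords) and the buckets are concatenated from highest to lowest score, reproducing the stable reverse-sort tie order exactly.
import Mathlib
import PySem

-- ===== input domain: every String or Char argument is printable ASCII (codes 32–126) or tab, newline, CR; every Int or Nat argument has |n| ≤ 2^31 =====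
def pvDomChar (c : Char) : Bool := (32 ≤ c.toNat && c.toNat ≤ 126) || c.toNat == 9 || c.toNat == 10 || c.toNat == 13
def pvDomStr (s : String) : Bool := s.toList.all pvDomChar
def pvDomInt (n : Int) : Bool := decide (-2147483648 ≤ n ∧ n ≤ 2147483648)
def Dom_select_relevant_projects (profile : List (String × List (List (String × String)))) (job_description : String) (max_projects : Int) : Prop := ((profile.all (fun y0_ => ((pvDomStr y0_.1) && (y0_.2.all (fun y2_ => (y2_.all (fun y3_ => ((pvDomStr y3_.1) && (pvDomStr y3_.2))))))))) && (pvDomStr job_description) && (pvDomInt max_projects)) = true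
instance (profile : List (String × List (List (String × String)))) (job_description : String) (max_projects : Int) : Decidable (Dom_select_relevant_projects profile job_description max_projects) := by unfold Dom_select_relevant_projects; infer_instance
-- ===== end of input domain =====

-- B replaces A's full stable reverse sort by a bucket (counting-sort) selection over the
-- bounded score range 0..len(relevant); same return value (objective: alternative algorithm).

-- shared helper: dict.get(k, default) on an association list (first match, as in Python)
def pvLookup {α : Type} (d : List (String × α)) (k : String) (dflt : α) : α :=
  match d.find? (fun p => p.1 == k) with
  | some p => p.2
  | none => dflt

-- ===== PORT A =====
def select_relevant_projects (profile : List (String × List (List (String × String)))) (job_description : String) (max_projects : Int) : List (List (String × String)) :=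
  let projects := pvLookup profile "projets" []
  if projects = [] then []
  else
    let job_desc_lower := PySem.Chars.lower job_description.toList
    let scored_projects := projects.foldl (fun acc project =>
      let project_text := PySem.Chars.lower
        ((pvLookup project "nom" "").toList ++ ' ' :: (pvLookup project "description" "").toList)
      let keywords : List String := ["react", "next", "node", "java", "spring", "python", "api",
        "data", "ia", "test", "docker", "postgres"]
      let score := keywords.foldl (fun s kw =>
        if PySem.Chars.isIn kw.toList job_desc_lower && PySem.Chars.isIn kw.toList project_text
        then s + 1 else s) (0 : Int)
      acc ++ [(score, project)]) []
    (PySem.List.slice (PySem.List.sorted scored_projects (fun x => x.1) true) none (some max_projects)).map (fun x => x.2)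

-- ===== PORT B =====
def pvKeywords : List String :=
  ["react", "next", "node", "java", "spring", "python", "api", "data", "ia", "test", "docker", "postgres"]

def select_relevant_projects_alt (profile : List (String × List (List (String × String)))) (job_description : String) (max_projects : Int) : List (List (String × String)) :=
  let projects := pvLookup profile "projets" []
  let job_desc_lower := PySem.Chars.lower job_description.toList
  let relevant := pvKeywords.filter (fun k => PySem.Chars.isIn k.toList job_desc_lower)
  let buckets := projects.foldl (fun bs project =>
      let text := PySem.Chars.lower
        ((pvLookup project "nom" "").toList ++ ' ' :: (pvLookup project "description" "").toList)
      let score := relevant.countP (fun k => PySem.Chars.isIn k.toList text)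
      bs.set score (bs.getD score [] ++ [project]))
    (List.replicate (relevant.length + 1) [])
  PySem.List.slice buckets.reverse.flatten none (some max_projects)

-- ===== PRECONDITION & SPEC =====
def Spec_select_relevant_projects (profile : List (String × List (List (String × String)))) (job_description : String) (max_projects : Int) (out : List (List (String × String))) : Prop := out = select_relevant_projects_alt profile job_description max_projects
instance (profile : List (String × List (List (String × String)))) (job_description : String) (max_projects : Int) (out : List (List (String × String))) : Decidable (Spec_select_relevant_projects profile job_description max_projects out) := by unfold Spec_select_relevant_projects; infer_instance

-- ===== CLAIM (what is proved, stated in full; the proofs are below) =====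
def Claim_equal_select_relevant_projects : Prop := ∀ (profile : List (String × List (List (String × String)))) (job_description : String) (max_projects : Int), Dom_select_relevant_projects profile job_description max_projects → Spec_select_relevant_projects profile job_description max_projects (select_relevant_projects profile job_description max_projects)

-- ===== LEMMAS AND PROOFS =====

-- A's counting loop = countP of the filtered keyword list
theorem pv_count (kws : List String) (c1 c2 : String → Bool) (s : Int) :
    kws.foldl (fun s kw => if c1 kw && c2 kw then s + 1 else s) s
      = s + ((kws.filter c1).countP c2 : Int) := by
  induction kws generalizing s with
  | nil => simp
  | cons k ks ih =>
    rw [List.foldl_cons, ih]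
    by_cases h1 : c1 k = true <;> by_cases h2 : c2 k = true <;>
      simp [h1, h2] <;> omega

-- one bucket update on a range-indexed table
theorem pv_set_map_range {α : Type} (m i : Nat) (h : i < m) (g : Nat → List α) (p : α) :
    ((List.range m).map g).set i (((List.range m).map g).getD i [] ++ [p])
      = (List.range m).map (fun s => if s = i then g s ++ [p] else g s) := by
  have hlen : i < ((List.range m).map g).length := by simpa using h
  rw [List.getD_eq_getElem _ _ hlen]
  apply List.ext_getElem
  · simp
  · intro n h1 h2
    simp only [List.getElem_set, List.getElem_map, List.getElem_range]
    by_cases hn : i = n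
    · simp [hn]
    · simp [hn]
      omega

-- the whole bucket fold = per-score filters
theorem pv_bucket_fold {α : Type} (ps : List α) (f : α → Nat) (m : Nat)
    (hf : ∀ p ∈ ps, f p < m) (g : Nat → List α) :
    ps.foldl (fun bs p => bs.set (f p) (bs.getD (f p) [] ++ [p])) ((List.range m).map g)
      = (List.range m).map (fun s => g s ++ ps.filter (fun p => f p == s)) := by
  induction ps generalizing g with
  | nil => simp
  | cons p ps ih =>
    simp only [List.foldl_cons]
    rw [pv_set_map_range m (f p) (hf p (by simp)) g p,
        ih (fun q hq => hf q (by simp [hq])) _]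
    apply List.map_congr_left
    intro s _
    by_cases hs : f p = s
    · simp [hs, List.filter_cons]
    · have hb : (f p == s) = false := beq_eq_false_iff_ne.mpr hs
      have hs' : ¬ s = f p := fun h => hs h.symm
      simp [hb, hs']

-- insertBy one-step equations
theorem pv_insertBy_cons {β : Type} (before : β → β → Bool) (x y : β) (ys : List β) :
    PySem.List.insertBy before x (y :: ys)
      = if before x y then x :: y :: ys else y :: PySem.List.insertBy before x ys := rfl

-- insertBy skips a prefix no element of which is "before"
theorem pv_insertBy_append {β : Type} (before : β → β → Bool) (x : β) (l r : List β)
    (h : ∀ y ∈ l, before x y = false) :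
    PySem.List.insertBy before x (l ++ r) = l ++ PySem.List.insertBy before x r := by
  induction l with
  | nil => simp
  | cons y ys ih =>
    have hy : before x y = false := h y (by simp)
    simp only [List.cons_append, pv_insertBy_cons, hy, Bool.false_eq_true, if_false]
    rw [ih (fun z hz => h z (by simp [hz]))]

theorem pv_insertBy_front {β : Type} (before : β → β → Bool) (x : β) (r : List β)
    (h : ∀ y ∈ r, before x y = true) :
    PySem.List.insertBy before x r = x :: r := by
  cases r with
  | nil => rfl
  | cons y ys => simp [pv_insertBy_cons, h y (by simp)]

-- inserting one element into a descending flat bucket structure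
theorem pv_insert_flat {β : Type} (vs : List Int) (hvs : vs.Pairwise (fun a b => b < a))
    (f : Int → List (Int × β)) (hf : ∀ v y, y ∈ f v → y.1 = v)
    (x : Int × β) (hx : x.1 ∈ vs) :
    PySem.List.insertBy (fun a b => decide (b.1 < a.1)) x (vs.flatMap f)
      = vs.flatMap (fun v => if v = x.1 then f v ++ [x] else f v) := by
  induction vs with
  | nil => cases hx
  | cons v vs ih =>
    have hlt : ∀ v' ∈ vs, v' < v := fun v' hv' => List.rel_of_pairwise_cons hvs hv'
    simp only [List.flatMap_cons]
    by_cases hv : v = x.1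
    · -- x lands at the end of bucket v
      rw [pv_insertBy_append _ _ _ _ (fun y hy => by
            simp [hf v y hy, hv])]
      rw [pv_insertBy_front _ _ _ (fun y hy => by
            obtain ⟨v', hv', hy'⟩ := List.mem_flatMap.mp hy
            have h1 := hf v' y hy'
            have h2 := hlt v' hv'
            simp [h1, ← hv]; omega)]
      have hrest : vs.flatMap (fun v' => if v' = x.1 then f v' ++ [x] else f v')
          = vs.flatMap f := by
        apply List.flatMap_congr
        intro v' hv'
        have : v' ≠ x.1 := by have := hlt v' hv'; omega
        simp [this]
      simp [hv, hrest]
    · have hx' : x.1 ∈ vs := by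
        cases hx with
        | head => exact absurd rfl hv
        | tail _ h => exact h
      rw [pv_insertBy_append _ _ _ _ (fun y hy => by
            have h1 := hf v y hy
            have h2 : x.1 < v := hlt x.1 hx'
            simp [h1]; omega)]
      rw [ih hvs.of_cons hx']
      simp [hv]

-- the insertion-sort fold over a covered descending bucket structure
theorem pv_fold_flat {β : Type} (L : List (Int × β)) (vs : List Int)
    (hvs : vs.Pairwise (fun a b => b < a))
    (f : Int → List (Int × β)) (hf : ∀ v y, y ∈ f v → y.1 = v)
    (hL : ∀ x ∈ L, x.1 ∈ vs) :
    L.foldl (fun acc x => PySem.List.insertBy (fun a b => decide (b.1 < a.1)) x acc) (vs.flatMap f)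
      = vs.flatMap (fun v => f v ++ L.filter (fun x => x.1 == v)) := by
  induction L generalizing f with
  | nil => simp
  | cons x L ih =>
    simp only [List.foldl_cons]
    rw [pv_insert_flat vs hvs f hf x (hL x (by simp))]
    rw [ih (fun v => if v = x.1 then f v ++ [x] else f v)
        (fun v y hy => by
          by_cases hv : v = x.1
          · simp only [hv, if_true] at hy
            rcases List.mem_append.mp hy with hy | hy
            · exact (hf x.1 y hy).trans hv.symm
            · rw [List.mem_singleton.mp hy]
              exact hv.symm
          · simp only [hv, if_false] at hy
            exact hf v y hy)
        (fun z hz => hL z (by simp [hz]))]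
    apply List.flatMap_congr
    intro v _
    by_cases hv : v = x.1
    · simp [hv, List.filter_cons]
    · have hb : (x.1 == v) = false := beq_eq_false_iff_ne.mpr (fun h => hv h.symm)
      simp [hb, hv]

-- Python's stable reverse sort by an Int key is the descending bucket concatenation
theorem pv_sorted_rev_buckets {β : Type} (L : List (Int × β)) (vs : List Int)
    (hvs : vs.Pairwise (fun a b => b < a)) (hL : ∀ x ∈ L, x.1 ∈ vs) :
    PySem.List.sorted L (fun x => x.1) true = vs.flatMap (fun v => L.filter (fun x => x.1 == v)) := by
  rw [PySem.List.sorted_rev_eq_foldl_insertBy]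
  have h0 : ([] : List (Int × β)) = vs.flatMap (fun _ => []) := by simp
  rw [h0, pv_fold_flat L vs hvs (fun _ => []) (by simp) hL]
  simp

-- slice [:m] commutes with map
theorem pv_slice_map {α β : Type} (g : α → β) (xs : List α) (b : Int) :
    (PySem.List.slice xs none (some b)).map g = PySem.List.slice (xs.map g) none (some b) := by
  simp [PySem.List.slice, List.map_take]

-- B's bucket fold, specialised to a countP score (the bound is automatic)
theorem pv_bucket_fold_count {α : Type} (ps : List α) (rel : List String) (q : α → String → Bool) :
    ps.foldl (fun bs p => bs.set (rel.countP (q p)) (bs.getD (rel.countP (q p)) [] ++ [p]))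
        (List.replicate (rel.length + 1) [])
      = (List.range (rel.length + 1)).map (fun s => ps.filter (fun p => rel.countP (q p) == s)) := by
  have hrepl : (List.replicate (rel.length + 1) ([] : List α))
      = (List.range (rel.length + 1)).map (fun _ => []) := by
    rw [List.map_const', List.length_range]
  rw [hrepl, pv_bucket_fold ps (fun p => rel.countP (q p)) (rel.length + 1)
    (fun p _ => Nat.lt_succ_of_le List.countP_le_length) (fun _ => [])]
  simp

-- shared tail: sorted-then-slice of (score, project) pairs = slice of reversed buckets
theorem pv_tail {β : Type} [DecidableEq β] (P : List β) (f : β → Nat) (R : Nat)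
    (hf : ∀ p, f p ≤ R) (m : Int) :
    (if P = [] then []
     else (PySem.List.slice (PySem.List.sorted (P.map (fun p => ((f p : Int), p))) (fun x => x.1) true)
            none (some m)).map (fun x => x.2))
      = PySem.List.slice (((List.range (R + 1)).map (fun s => P.filter (fun p => f p == s))).reverse.flatten)
          none (some m) := by
  have hvsp : (((List.range (R + 1)).reverse).map (fun n : Nat => (n : Int))).Pairwise
      (fun a b => b < a) :=
    List.Pairwise.map _ (fun a b h => by exact_mod_cast h)
      (List.pairwise_reverse.mpr (by simpa using List.pairwise_lt_range (n := R + 1)))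
  have hcover : ∀ x ∈ P.map (fun p => (((f p : Nat) : Int), p)),
      x.1 ∈ ((List.range (R + 1)).reverse).map (fun n : Nat => (n : Int)) := by
    intro x hx
    obtain ⟨p, hp, hxe⟩ := List.mem_map.mp hx
    rw [← hxe]
    exact List.mem_map.mpr ⟨f p, List.mem_reverse.mpr (List.mem_range.mpr (Nat.lt_succ_of_le (hf p))), rfl⟩
  by_cases hpe : P = []
  · simp [hpe, PySem.List.slice]
  · rw [if_neg hpe,
        pv_sorted_rev_buckets (P.map (fun p => (((f p : Nat) : Int), p))) _ hvsp hcover,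
        pv_slice_map]
    refine congrArg (fun l => PySem.List.slice l none (some m)) ?_
    rw [List.map_flatMap, List.flatMap_map, ← List.map_reverse, ← List.flatMap_def]
    apply List.flatMap_congr
    intro n _
    rw [List.filter_map]
    have hpred : ((fun x : Int × β => x.1 == (n : Int)) ∘ (fun p => (((f p : Nat) : Int), p)))
        = fun p => f p == n := by
      funext p
      by_cases h : f p = n
      · simp [Function.comp, h]
      · have h1 : (((f p : Nat) : Int) == (n : Int)) = false :=
          beq_eq_false_iff_ne.mpr (by exact_mod_cast h)
        have h2 : (f p == n) = false := beq_eq_false_iff_ne.mpr h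
        simp [Function.comp, h1, h2]
    rw [hpred, List.map_map]
    have hid : ((fun x : Int × β => x.2) ∘ fun p => (((f p : Nat) : Int), p)) = id :=
      funext fun p => rfl
    rw [hid, List.map_id]

-- the two ports agree on every input
set_option maxHeartbeats 1000000 in
theorem pv_main (profile : List (String × List (List (String × String)))) (job_description : String) (max_projects : Int) :
    select_relevant_projects profile job_description max_projects
      = select_relevant_projects_alt profile job_description max_projects := by
  simp only [select_relevant_projects, select_relevant_projects_alt, pvKeywords]
  simp only [pv_count, pv_bucket_fold_count, PySem.List.foldl_append_singleton_eq_map,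
    List.nil_append, zero_add]
  have htail := pv_tail (pvLookup profile "projets" [])
    (fun p => (((["react", "next", "node", "java", "spring", "python", "api",
        "data", "ia", "test", "docker", "postgres"] : List String).filter
          (fun k => PySem.Chars.isIn k.toList (PySem.Chars.lower job_description.toList))).countP
      (fun k => PySem.Chars.isIn k.toList (PySem.Chars.lower
        ((pvLookup p "nom" "").toList ++ ' ' :: (pvLookup p "description" "").toList)))))
    ((["react", "next", "node", "java", "spring", "python", "api",
        "data", "ia", "test", "docker", "postgres"] : List String).filter
          (fun k => PySem.Chars.isIn k.toList (PySem.Chars.lower job_description.toList))).length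
    (fun p => List.countP_le_length) max_projects
  exact htail

-- ===== VERDICT (by name: the statement is the Claim_ definition above) =====
theorem select_relevant_projects_spec : Claim_equal_select_relevant_projects := by
  intro profile job_description max_projects _
  unfold Spec_select_relevant_projects
  exact pv_main profile job_description max_projects
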